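-- pv_equiv track=rewrite | github.com/ellynhan/challenge100-codingtest-study | suyeonsu/String_신규아이디추천.py | solution
-- ===== SOURCE A (Python) =====
-- def solution(new_id):
--
--     new_id = new_id.lower()
--     new_id = ''.join([x for x in new_id if x in ['-', '_', '.'] or x.isalnum()])
--     new_id = '.'.join([x for x in new_id.split('.') if x != ''])
--     l = len(new_id)
--     if l > 3:
--         if l > 15: new_id = new_id[:15]
--         if new_id[0] == '.': new_id = new_id[1:]
--         if new_id[-1] == '.': new_id = new_id[:-1]
--     else:
--         if l == 0: new_id = 'a'
--         new_id += new_id[-1] * (3-len(new_id))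
--
--     return new_id
-- ===== SOURCE B (Python) =====
-- def solution(new_id):
--     # single left-to-right pass: build the cleaned core directly,
--     # collapsing dot runs and dropping a leading dot as we go
--     out = []
--     for c in new_id.lower():
--         if c in '-_' or c.isalnum():
--             out.append(c)
--         elif c == '.':
--             if out and out[-1] != '.':
--                 out.append(c)
--     if out and out[-1] == '.':
--         out.pop()
--     core = ''.join(out)
--     l = len(core)
--     if l > 3:
--         core = core[:15]
--         if core[-1] == '.':
--             core = core[:-1]
--     elif l == 0:
--         core = 'aaa'
--     else:
--         core += core[-1] * (3 - l)
--     return core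
-- ===== Notes on version B (the rewrite author's own statement) =====
-- stated objective: alternative
-- what changed: Replaces A's three-pass pipeline (a filter comprehension, then split on the dot separator with empty parts dropped and rejoined, then fixups) by one stateful left-to-right scan that emits a dot only right after a non-dot character, followed by a single trailing-dot strip; the length logic is then a plain three-way branch.
import Mathlib
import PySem

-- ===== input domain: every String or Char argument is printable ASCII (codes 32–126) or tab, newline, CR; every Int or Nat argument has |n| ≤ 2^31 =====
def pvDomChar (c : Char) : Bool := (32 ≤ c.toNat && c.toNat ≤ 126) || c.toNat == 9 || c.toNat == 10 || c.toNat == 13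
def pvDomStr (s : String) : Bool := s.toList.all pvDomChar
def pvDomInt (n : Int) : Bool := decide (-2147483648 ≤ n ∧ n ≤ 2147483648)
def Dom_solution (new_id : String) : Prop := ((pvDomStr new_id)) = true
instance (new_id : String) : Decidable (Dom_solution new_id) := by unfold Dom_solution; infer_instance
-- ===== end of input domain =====

-- B replaces A's filter + split-on-dot/rejoin pipeline by a single stateful scan plus one trailing-dot strip (alternative decomposition, same cost).


-- ===== PORT A =====
def solution (new_id : String) : String :=
  let s1 := PySem.Chars.lower new_id.toList
  let s2 := s1.filter (fun x => (x == '-' || x == '_' || x == '.') || PySem.Chars.isalnum x)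
  let s3 := PySem.Chars.join ['.'] ((PySem.Chars.splitOn s2 ['.']).filter (fun x => decide (x ≠ [])))
  let l := s3.length
  if l > 3 then
    let s4 := if l > 15 then PySem.List.slice s3 none (some 15) else s3
    let s5 := if PySem.List.pyGet? s4 0 = some '.' then PySem.List.slice s4 (some 1) none else s4
    let s6 := if PySem.List.pyGet? s5 (-1) = some '.' then PySem.List.slice s5 none (some (-1)) else s5
    String.ofList s6
  else
    let s4 := if l = 0 then ['a'] else s3
    match PySem.List.pyGet? s4 (-1) with
    | some c => String.ofList (s4 ++ List.replicate (3 - s4.length) c)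
    | none => String.ofList s4   -- unreachable: s4 is nonempty

-- ===== PORT B =====
def solStep (out : List Char) (c : Char) : List Char :=
  if c = '-' ∨ c = '_' ∨ PySem.Chars.isalnum c then out ++ [c]
  else if c = '.' then (if out ≠ [] ∧ out.getLast? ≠ some '.' then out ++ [c] else out)
  else out

def solution_alt (new_id : String) : String :=
  let out := (PySem.Chars.lower new_id.toList).foldl solStep []
  let core := if out.getLast? = some '.' then out.dropLast else out
  let l := core.length
  if l > 3 then
    let core2 := core.take 15
    String.ofList (if core2.getLast? = some '.' then core2.dropLast else core2)
  else if l = 0 then "aaa"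
  else
    match core.getLast? with
    | some c => String.ofList (core ++ List.replicate (3 - l) c)
    | none => String.ofList core   -- unreachable: core is nonempty

-- ===== PRECONDITION & SPEC =====
def Spec_solution (new_id : String) (out : String) : Prop := out = solution_alt new_id
instance (new_id : String) (out : String) : Decidable (Spec_solution new_id out) := by unfold Spec_solution; infer_instance

-- ===== CLAIM (what is proved, stated in full; the proofs are below) =====
def Claim_equal_solution : Prop := ∀ (new_id : String), Dom_solution new_id → Spec_solution new_id (solution new_id)

-- ===== LEMMAS AND PROOFS =====

-- keep predicate of A's first filter
def keepA (c : Char) : Bool := (c == '-' || c == '_' || c == '.') || PySem.Chars.isalnum c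

-- natural recursion computing split-on-dot
def sp : List Char → List (List Char)
  | [] => [[]]
  | c :: r => if c = '.' then [] :: sp r else (sp r).modifyHead (c :: ·)

-- the cleaned core (leading dots dropped, dot runs collapsed, trailing dots dropped)
mutual
def clean : List Char → List Char
  | [] => []
  | c :: r => if c = '.' then clean r else c :: cleanAux r
def cleanAux : List Char → List Char
  | [] => []
  | c :: r => if c = '.' then (match clean r with | [] => [] | l => '.' :: l) else c :: cleanAux r
end

-- like clean/cleanAux but keeping a pending trailing dot (the fold's intermediate state)
mutual
def cleanP : List Char → List Char
  | [] => []
  | c :: r => if c = '.' then cleanP r else c :: cleanAuxP r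
def cleanAuxP : List Char → List Char
  | [] => []
  | c :: r => if c = '.' then '.' :: cleanP r else c :: cleanAuxP r
end

-- drop one trailing dot
def stripT (xs : List Char) : List Char :=
  if xs.getLast? = some '.' then xs.dropLast else xs

-- single-separator join written recursively
def joinDot : List (List Char) → List Char
  | [] => []
  | [a] => a
  | a :: b :: t => a ++ '.' :: joinDot (b :: t)

def flatD (t : List (List Char)) : List Char :=
  (t.filter (fun x => decide (x ≠ []))).flatMap (fun a => '.' :: a)

theorem pyGet?_neg_one (xs : List Char) (h : xs ≠ []) :
    PySem.List.pyGet? xs (-1) = xs.getLast? := by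
  have hl : 1 ≤ xs.length := List.length_pos_iff.mpr h
  simp [PySem.List.pyGet?, PySem.List.pyIdx?, hl, List.getLast?_eq_getElem?]

theorem modifyHead_id' (xs : List (List Char)) : xs.modifyHead (fun x => x) = xs := by
  cases xs <;> simp

theorem sp_ne_nil (l : List Char) : sp l ≠ [] := by
  cases l with
  | nil => simp [sp]
  | cons c r =>
    simp only [sp]
    split
    · simp
    · cases h : sp r with
      | nil => exact absurd h (sp_ne_nil r)
      | cons a t => simp

theorem go_eq_sp (l : List Char) : ∀ (fuel : Nat) (cur : List Char) (acc : List (List Char)),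
    l.length < fuel →
    PySem.Chars.splitOn.go ['.'] fuel l cur acc
      = acc.reverse ++ (sp l).modifyHead (cur.reverse ++ ·) := by
  induction l with
  | nil =>
    intro fuel cur acc h
    cases fuel with
    | zero => omega
    | succ n => simp [PySem.Chars.splitOn.go, sp]
  | cons c r ih =>
    intro fuel cur acc h
    cases fuel with
    | zero => simp at h
    | succ n =>
      have hr : r.length < n := by simpa using h
      by_cases hc : c = '.'
      · subst hc
        have hpre : List.isPrefixOf ['.'] ('.' :: r) = true := by
          simp [List.isPrefixOf]
        rw [PySem.Chars.splitOn.go, if_pos hpre]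
        simp only [List.length_singleton, List.drop_succ_cons, List.drop_zero]
        rw [ih n [] (cur.reverse :: acc) hr]
        simp [sp, modifyHead_id']
      · have hpre : List.isPrefixOf ['.'] (c :: r) = false := by
          simp [List.isPrefixOf]
          exact fun h' => absurd h'.symm hc
        rw [PySem.Chars.splitOn.go, if_neg (by simp [hpre])]
        rw [ih n (c :: cur) acc hr]
        simp only [sp, if_neg hc]
        cases hs : sp r with
        | nil => exact absurd hs (sp_ne_nil r)
        | cons a t => simp

theorem splitOn_eq_sp (l : List Char) : PySem.Chars.splitOn l ['.'] = sp l := by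
  rw [PySem.Chars.splitOn, go_eq_sp l (l.length + 1) [] [] (by omega)]
  simp [modifyHead_id']

theorem join_eq_joinDot (ps : List (List Char)) :
    PySem.Chars.join ['.'] ps = joinDot ps := by
  induction ps with
  | nil => simp [joinDot, PySem.Chars.join_nil]
  | cons a t ih =>
    cases t with
    | nil => simp [joinDot, PySem.Chars.join_singleton]
    | cons b t' =>
      rw [joinDot, PySem.Chars.join_cons_cons, ih]
      simp

theorem joinDot_cons (a : List Char) (qs : List (List Char)) :
    joinDot (a :: qs) = a ++ qs.flatMap (fun x => '.' :: x) := by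
  induction qs generalizing a with
  | nil => simp [joinDot]
  | cons b t ih => simp [joinDot, ih]

theorem joinDot_sp_eq_clean (l : List Char) :
    joinDot ((sp l).filter (fun x => decide (x ≠ []))) = clean l ∧
    (∀ h t, sp l = h :: t → h ++ flatD t = cleanAux l) := by
  induction l with
  | nil =>
    constructor
    · simp [sp, joinDot, clean]
    · intro h t hs
      simp [sp] at hs
      simp [hs.1, hs.2, flatD, cleanAux]
  | cons c r ih =>
    by_cases hc : c = '.'
    · subst hc
      have key : flatD (sp r) = cleanAux ('.' :: r) := by
        have hca : cleanAux ('.' :: r) = (match clean r with | [] => [] | l => '.' :: l) := by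
          simp [cleanAux]
        rw [hca, ← ih.1]
        cases hq : (sp r).filter (fun x => decide (x ≠ [])) with
        | nil => simp only [flatD, hq, joinDot]; simp
        | cons a rest =>
          have ham : a ∈ (sp r).filter (fun x => decide (x ≠ [])) := by
            rw [hq]; exact List.mem_cons_self
          have ha : a ≠ [] := by simpa using (List.mem_filter.mp ham).2
          simp only [flatD, hq, joinDot_cons]
          cases a with
          | nil => exact absurd rfl ha
          | cons x xs => simp [joinDot_cons]
      constructor
      · have hsp : sp ('.' :: r) = [] :: sp r := by simp [sp]
        have hcl : clean ('.' :: r) = clean r := by simp [clean]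
        rw [hsp, hcl, ← ih.1]
        simp
      · intro h t hs
        simp only [sp, if_pos rfl] at hs
        obtain ⟨hh, ht⟩ := List.cons.inj hs
        subst hh; subst ht
        simpa using key
    · have hsp := sp_ne_nil r
      cases hsr : sp r with
      | nil => exact absurd hsr hsp
      | cons h' t' =>
        have hAux : (c :: h') ++ flatD t' = cleanAux (c :: r) := by
          simp only [cleanAux, if_neg hc]
          have := ih.2 h' t' hsr
          simpa using congrArg (c :: ·) this
        constructor
        · simp only [sp, if_neg hc, hsr, List.modifyHead]
          have : (decide ((c :: h') ≠ [])) = true := by simp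
          simp only [List.filter_cons, this, if_pos]
          rw [joinDot_cons]
          simp only [clean, if_neg hc]
          have := ih.2 h' t' hsr
          rw [← this]
          simp [flatD]
        · intro h t hs
          simp only [sp, if_neg hc, hsr, List.modifyHead] at hs
          obtain ⟨hh, ht⟩ := List.cons.inj hs
          subst ht
          rw [← hh]
          exact hAux

theorem solStep_drop (c : Char) (hk : keepA c = false) (a : List Char) : solStep a c = a := by
  simp only [keepA, Bool.or_eq_false_iff, beq_eq_false_iff_ne, ne_eq] at hk
  simp [solStep, hk.1.1.1, hk.1.1.2, hk.1.2, hk.2]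

theorem foldl_filter_keep (l : List Char) : ∀ (a : List Char),
    l.foldl solStep a = (l.filter keepA).foldl solStep a := by
  induction l with
  | nil => intro a; rfl
  | cons c r ih =>
    intro a
    by_cases hk : keepA c = true
    · simp [List.filter_cons, hk, List.foldl_cons, ih]
    · have hk' : keepA c = false := by simpa using hk
      simp [List.filter_cons, hk', List.foldl_cons, solStep_drop c hk', ih]

theorem solStep_keep (c : Char) (hc : c ≠ '.') (hk : keepA c = true) (a : List Char) :
    solStep a c = a ++ [c] := by
  simp only [keepA, Bool.or_eq_true, beq_iff_eq] at hk
  rcases hk with ((h | h) | h) | h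
  · subst h; simp [solStep]
  · subst h; simp [solStep]
  · exact absurd h hc
  · simp [solStep, h]

theorem fold_clean (l : List Char) (h : ∀ c ∈ l, keepA c = true) :
    ((∀ p : List Char, p ≠ [] → p.getLast? ≠ some '.' →
        l.foldl solStep p = p ++ cleanAuxP l) ∧
     (∀ p : List Char, p ≠ [] →
        l.foldl solStep (p ++ ['.']) = p ++ '.' :: cleanP l) ∧
     l.foldl solStep [] = cleanP l) := by
  induction l with
  | nil => exact ⟨fun p _ _ => by simp [cleanAuxP], fun p _ => by simp [cleanP], by simp [cleanP]⟩
  | cons c r ih =>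
    have hc' : keepA c = true := h c (by simp)
    have hr : ∀ c ∈ r, keepA c = true := fun x hx => h x (by simp [hx])
    obtain ⟨ih1, ih2, ih3⟩ := ih hr
    by_cases hc : c = '.'
    · subst hc
      refine ⟨?_, ?_, ?_⟩
      · intro p hp hlast
        have hstep : solStep p '.' = p ++ ['.'] := by
          simp only [solStep]
          rw [if_neg (by decide), if_pos trivial, if_pos ⟨hp, hlast⟩]
        simp only [List.foldl_cons, hstep]
        rw [ih2 p hp]
        simp [cleanAuxP]
      · intro p hp
        have hstep : solStep (p ++ ['.']) '.' = p ++ ['.'] := by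
          simp only [solStep]
          rw [if_neg (by decide), if_pos trivial, if_neg (by simp)]
        simp only [List.foldl_cons, hstep]
        rw [ih2 p hp]
        simp [cleanP]
      · have hstep : solStep [] '.' = [] := by
          simp only [solStep]
          rw [if_neg (by decide), if_pos trivial, if_neg (by simp)]
        simp only [List.foldl_cons, hstep]
        rw [ih3]
        simp [cleanP]
    · refine ⟨?_, ?_, ?_⟩
      · intro p hp hlast
        simp only [List.foldl_cons, solStep_keep c hc hc' p, cleanAuxP, if_neg hc]
        rw [ih1 (p ++ [c]) (by simp) (by simp [hc])]
        simp
      · intro p hp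
        simp only [List.foldl_cons, solStep_keep c hc hc' (p ++ ['.']), cleanP, if_neg hc]
        rw [ih1 ((p ++ ['.']) ++ [c]) (by simp) (by simp [hc])]
        simp
      · simp only [List.foldl_cons, solStep_keep c hc hc' [], List.nil_append, cleanP,
          if_neg hc]
        rw [ih1 [c] (by simp) (by simp [hc])]
        simp

theorem cleanP_head_ne_dot (l : List Char) : ∀ c r, cleanP l = c :: r → c ≠ '.' := by
  induction l with
  | nil => intro c r h; simp [cleanP] at h
  | cons x t ih =>
    intro c r h
    by_cases hx : x = '.'
    · subst hx
      simp only [cleanP, if_pos rfl] at h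
      exact ih c r h
    · simp only [cleanP, if_neg hx] at h
      obtain ⟨h1, _⟩ := List.cons.inj h
      rw [← h1]; exact hx

theorem stripT_cons_ne_nil (c : Char) (xs : List Char) (h : xs ≠ []) :
    stripT (c :: xs) = c :: stripT xs := by
  cases xs with
  | nil => exact absurd rfl h
  | cons a t =>
    simp only [stripT, List.getLast?_cons_cons]
    split
    · simp
    · rfl

theorem stripT_cons (c : Char) (hc : c ≠ '.') (xs : List Char) :
    stripT (c :: xs) = c :: stripT xs := by
  cases xs with
  | nil => simp [stripT, hc]
  | cons a t => exact stripT_cons_ne_nil c (a :: t) (by simp)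

theorem stripT_clean (l : List Char) :
    stripT (cleanP l) = clean l ∧ stripT (cleanAuxP l) = cleanAux l := by
  induction l with
  | nil => constructor <;> simp [cleanP, cleanAuxP, clean, cleanAux, stripT]
  | cons c r ih =>
    by_cases hc : c = '.'
    · subst hc
      refine ⟨?_, ?_⟩
      · simp only [cleanP, clean, if_pos rfl]
        exact ih.1
      · simp only [cleanAuxP, cleanAux, if_pos rfl, if_pos trivial]
        cases hq : cleanP r with
        | nil =>
          have : clean r = [] := by rw [← ih.1, hq]; rfl
          simp [this, stripT]
        | cons d t =>
          have hd : d ≠ '.' := cleanP_head_ne_dot r d t hq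
          have hcl : clean r = stripT (d :: t) := by rw [← ih.1, hq]
          have hcl' : clean r = d :: stripT t := by rw [hcl, stripT_cons d hd]
          rw [stripT_cons_ne_nil '.' (d :: t) (by simp), ← hcl, hcl']
    · refine ⟨?_, ?_⟩
      · simp only [cleanP, clean, if_neg hc]
        rw [stripT_cons c hc]
        rw [ih.2]
      · simp only [cleanAuxP, cleanAux, if_neg hc]
        rw [stripT_cons c hc]
        rw [ih.2]

theorem clean_last_ne_dot (l : List Char) :
    (clean l).getLast? ≠ some '.' ∧ (cleanAux l).getLast? ≠ some '.' := by
  induction l with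
  | nil => constructor <;> simp [clean, cleanAux]
  | cons c r ih =>
    by_cases hc : c = '.'
    · subst hc
      refine ⟨by simpa [clean] using ih.1, ?_⟩
      simp only [cleanAux, if_pos rfl]
      cases hq : clean r with
      | nil => simp
      | cons d t =>
        have : (clean r).getLast? ≠ some '.' := ih.1
        rw [hq] at this
        simpa [List.getLast?_cons_cons] using this
    · refine ⟨?_, ?_⟩
      · simp only [clean, if_neg hc]
        cases hq : cleanAux r with
        | nil => simp [hc]
        | cons d t =>
          have := ih.2; rw [hq] at this
          simpa [List.getLast?_cons_cons] using this
      · simp only [cleanAux, if_neg hc]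
        cases hq : cleanAux r with
        | nil => simp [hc]
        | cons d t =>
          have := ih.2; rw [hq] at this
          simpa [List.getLast?_cons_cons] using this

theorem clean_head_ne_dot (l : List Char) : ∀ c r, clean l = c :: r → c ≠ '.' := by
  induction l with
  | nil => intro c r h; simp [clean] at h
  | cons x t ih =>
    intro c r h
    by_cases hx : x = '.'
    · subst hx
      simp only [clean, if_pos rfl] at h
      exact ih c r h
    · simp only [clean, if_neg hx] at h
      obtain ⟨h1, _⟩ := List.cons.inj h
      rw [← h1]; exact hx

theorem tail_eq (C : List Char) (hhead : ∀ c r, C = c :: r → c ≠ '.')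
    (hlast : C.getLast? ≠ some '.') :
    (if C.length > 3 then
      let s4 := if C.length > 15 then PySem.List.slice C none (some 15) else C
      let s5 := if PySem.List.pyGet? s4 0 = some '.' then PySem.List.slice s4 (some 1) none else s4
      let s6 := if PySem.List.pyGet? s5 (-1) = some '.' then PySem.List.slice s5 none (some (-1)) else s5
      String.ofList s6
    else
      let s4 := if C.length = 0 then ['a'] else C
      match PySem.List.pyGet? s4 (-1) with
      | some c => String.ofList (s4 ++ List.replicate (3 - s4.length) c)
      | none => String.ofList s4) =
    (if C.length > 3 then
      let core2 := C.take 15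
      String.ofList (if core2.getLast? = some '.' then core2.dropLast else core2)
    else if C.length = 0 then "aaa"
    else
      match C.getLast? with
      | some c => String.ofList (C ++ List.replicate (3 - C.length) c)
      | none => String.ofList C) := by
  by_cases h3 : C.length > 3
  · rw [if_pos h3, if_pos h3]
    simp only []
    have h15 : (if C.length > 15 then PySem.List.slice C none (some 15) else C) = C.take 15 := by
      split_ifs with h
      · have h' : ((15 : Int)) = ((15 : Nat) : Int) := by norm_num
        rw [h', PySem.List.slice_to_natCast]
      · rw [List.take_of_length_le (by omega)]
    have hne : C ≠ [] := by intro h; rw [h] at h3; simp at h3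
    obtain ⟨c, r, hC⟩ := List.exists_cons_of_ne_nil hne
    have hc : c ≠ '.' := hhead c r hC
    have htake : C.take 15 = c :: r.take 14 := by rw [hC]; rfl
    have hget0 : PySem.List.pyGet? (C.take 15) 0 = some c := by
      rw [htake, show ((0 : Int)) = ((0 : Nat) : Int) from rfl, PySem.List.pyGet?_natCast]
      rfl
    rw [h15, hget0]
    rw [if_neg (show ¬ (some c = some '.') by simp [hc])]
    rw [pyGet?_neg_one (C.take 15) (by rw [htake]; simp)]
    rw [PySem.List.slice_to_neg_one]
  · rw [if_neg h3, if_neg h3]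
    by_cases h0 : C.length = 0
    · have hC : C = [] := List.length_eq_zero_iff.mp h0
      subst hC
      decide
    · rw [if_neg h0, if_neg h0]
      have hne : C ≠ [] := fun h => h0 (by rw [h]; rfl)
      show (match PySem.List.pyGet? C (-1) with
            | some c => String.ofList (C ++ List.replicate (3 - C.length) c)
            | none => String.ofList C) = _
      rw [pyGet?_neg_one C hne]

-- ===== VERDICT (by name: the statement is the Claim_ definition above) =====
theorem solution_spec : Claim_equal_solution := by
  intro new_id _
  unfold Spec_solution solution solution_alt
  have hfilter : (PySem.Chars.lower new_id.toList).filter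
      (fun x => (x == '-' || x == '_' || x == '.') || PySem.Chars.isalnum x)
      = (PySem.Chars.lower new_id.toList).filter keepA := rfl
  simp only []
  rw [hfilter]
  set fs := (PySem.Chars.lower new_id.toList).filter keepA with hfs
  have hkeep : ∀ c ∈ fs, keepA c = true := fun c hc => (List.mem_filter.mp hc).2
  rw [splitOn_eq_sp, join_eq_joinDot, (joinDot_sp_eq_clean fs).1]
  rw [foldl_filter_keep, ← hfs, (fold_clean fs hkeep).2.2]
  rw [show (if (cleanP fs).getLast? = some '.' then (cleanP fs).dropLast else cleanP fs)
        = clean fs from (stripT_clean fs).1]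
  exact tail_eq (clean fs) (clean_head_ne_dot fs) (clean_last_ne_dot fs).1
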